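-- pv_equiv track=rewrite | github.com/iDorgham/Ai-Workspace-Factory-AIWF | factory/library/03-security-compliance/mena-regulatory-compliance/skills/regulatory-authority-mapping/core.py | route_to_regulator
-- ===== SOURCE A (Python) =====
-- from typing import Dict, Any, List
--
-- def route_to_regulator(business_model: Dict[str, Any]) -> Dict[str, Any]:
--     """
--     Routes the business model to the correct regulatory node in UAE/Egypt.
--     Factors: Activity Type (Crypto, Banking, Mainland), Region (Dubai, Abu Dhabi, Egypt).
--     """
--     region = business_model.get("region", "Mainland Dubai").lower()
--     activity = business_model.get("activity", "Generic").lower()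
--
--     # Logic for UAE Jurisdictions
--     if "dubai" in region:
--         if any(x in activity for x in ["crypto", "web3", "virtual asset"]):
--             if "difc" in region:
--                 return {"authority": "DFSA", "jurisdiction": "DIFC", "framework": "DIFC Financial Law"}
--             return {"authority": "VARA", "jurisdiction": "Dubai (Non-DIFC)", "framework": "VARA Regulations"}
--
--         if any(x in activity for x in ["banking", "payment", "insurance"]):
--             if "difc" in region:
--                 return {"authority": "DFSA", "jurisdiction": "DIFC", "framework": "DIFC Financial Law"}
--             return {"authority": "CBUAE", "jurisdiction": "Mainland/Onshore", "framework": "Federal Banking Law"}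
--
--         return {"authority": "DED", "jurisdiction": "Mainland", "framework": "Commercial Companies Law"}
--
--     if "abu dhabi" in region:
--         if "adgm" in region:
--             return {"authority": "FSRA", "jurisdiction": "ADGM", "framework": "Common Law"}
--         return {"authority": "CBUAE / AD-DED", "jurisdiction": "Mainland", "framework": "Federal Law"}
--
--     # Logic for Egypt Jurisdictions
--     if "egypt" in region:
--         if any(x in activity for x in ["banking", "pay", "digital wallet"]):
--             return {"authority": "CBE", "jurisdiction": "National", "framework": "Law No. 194 of 2020"}
--         if any(x in activity for x in ["micro-finance", "insurance", "capital"]):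
--             return {"authority": "FRA", "jurisdiction": "National", "framework": "Law No. 10 of 2009"}
--         return {"authority": "GAFI / ITIDA", "jurisdiction": "National", "framework": "Investment Law No. 72"}
--
--     return {"authority": "UNKNOWN", "jurisdiction": region, "framework": "REQUIRES_LEGAL_AUDIT"}
-- ===== SOURCE B (Python) =====
-- # Staged classification: derive a (zone, sub-zone flag, activity category) key
-- # independently, then look the answer up in one flat table.
--
-- ZONES = [("dubai", "difc"), ("abu dhabi", "adgm"), ("egypt", None)]
--
-- ACTIVITY_TAGS = {
--     "dubai": [("crypto", ["crypto", "web3", "virtual asset"]),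
--               ("finance", ["banking", "payment", "insurance"])],
--     "egypt": [("bank", ["banking", "pay", "digital wallet"]),
--               ("fra", ["micro-finance", "insurance", "capital"])],
-- }
--
-- TABLE = {
--     ("dubai", True, "crypto"): {"authority": "DFSA", "jurisdiction": "DIFC", "framework": "DIFC Financial Law"},
--     ("dubai", False, "crypto"): {"authority": "VARA", "jurisdiction": "Dubai (Non-DIFC)", "framework": "VARA Regulations"},
--     ("dubai", True, "finance"): {"authority": "DFSA", "jurisdiction": "DIFC", "framework": "DIFC Financial Law"},
--     ("dubai", False, "finance"): {"authority": "CBUAE", "jurisdiction": "Mainland/Onshore", "framework": "Federal Banking Law"},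
--     ("dubai", True, "other"): {"authority": "DED", "jurisdiction": "Mainland", "framework": "Commercial Companies Law"},
--     ("dubai", False, "other"): {"authority": "DED", "jurisdiction": "Mainland", "framework": "Commercial Companies Law"},
--     ("abu dhabi", True, "other"): {"authority": "FSRA", "jurisdiction": "ADGM", "framework": "Common Law"},
--     ("abu dhabi", False, "other"): {"authority": "CBUAE / AD-DED", "jurisdiction": "Mainland", "framework": "Federal Law"},
--     ("egypt", False, "bank"): {"authority": "CBE", "jurisdiction": "National", "framework": "Law No. 194 of 2020"},
--     ("egypt", False, "fra"): {"authority": "FRA", "jurisdiction": "National", "framework": "Law No. 10 of 2009"},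
--     ("egypt", False, "other"): {"authority": "GAFI / ITIDA", "jurisdiction": "National", "framework": "Investment Law No. 72"},
-- }
--
--
-- def route_to_regulator(business_model):
--     region = business_model.get("region", "Mainland Dubai").lower()
--     activity = business_model.get("activity", "Generic").lower()
--
--     zone, marker = next(((z, m) for z, m in ZONES if z in region), (None, None))
--     if zone is None:
--         return {"authority": "UNKNOWN", "jurisdiction": region, "framework": "REQUIRES_LEGAL_AUDIT"}
--
--     flag = marker is not None and marker in region
--     cat = next((tag for tag, subs in ACTIVITY_TAGS.get(zone, [])
--                 if any(s in activity for s in subs)), "other")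
--     return TABLE[(zone, flag, cat)]
-- ===== Notes on version B (the rewrite author's own statement) =====
-- stated objective: alternative
-- what changed: Replaces A's interleaved nested if/return cascade by staged classification: two independent classifiers compute a (zone, sub-zone flag, activity category) key from ordered zone/taxonomy data, and the answer is a single flat dict lookup on that key.
import Mathlib
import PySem

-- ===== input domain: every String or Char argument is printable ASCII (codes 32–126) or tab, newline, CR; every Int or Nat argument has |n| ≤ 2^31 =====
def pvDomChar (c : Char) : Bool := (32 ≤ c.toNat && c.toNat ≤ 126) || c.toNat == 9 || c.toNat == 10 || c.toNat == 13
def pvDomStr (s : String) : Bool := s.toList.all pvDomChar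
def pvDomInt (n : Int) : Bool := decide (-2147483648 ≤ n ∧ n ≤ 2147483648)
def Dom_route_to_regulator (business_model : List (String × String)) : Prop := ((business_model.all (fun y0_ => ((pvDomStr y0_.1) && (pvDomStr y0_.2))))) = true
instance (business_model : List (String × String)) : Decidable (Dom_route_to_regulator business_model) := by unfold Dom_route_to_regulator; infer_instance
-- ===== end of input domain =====

-- B replaces A's interleaved nested branch cascade by staged classification: it computes a
-- (zone, sub-zone flag, activity category) key with two independent classifiers and then
-- performs a single flat table lookup (objective: alternative; same cost, same return values).

-- ===== PORT A =====
def route_to_regulator (business_model : List (String × String)) : List (String × String) :=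
  let region := PySem.Str.lower (PySem.Dict.getD (PySem.Dict.mk business_model) "region" "Mainland Dubai")
  let activity := PySem.Str.lower (PySem.Dict.getD (PySem.Dict.mk business_model) "activity" "Generic")
  if PySem.Str.isIn "dubai" region then
    if ["crypto", "web3", "virtual asset"].any (fun x => PySem.Str.isIn x activity) then
      if PySem.Str.isIn "difc" region then
        [("authority", "DFSA"), ("jurisdiction", "DIFC"), ("framework", "DIFC Financial Law")]
      else
        [("authority", "VARA"), ("jurisdiction", "Dubai (Non-DIFC)"), ("framework", "VARA Regulations")]
    else if ["banking", "payment", "insurance"].any (fun x => PySem.Str.isIn x activity) then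
      if PySem.Str.isIn "difc" region then
        [("authority", "DFSA"), ("jurisdiction", "DIFC"), ("framework", "DIFC Financial Law")]
      else
        [("authority", "CBUAE"), ("jurisdiction", "Mainland/Onshore"), ("framework", "Federal Banking Law")]
    else
      [("authority", "DED"), ("jurisdiction", "Mainland"), ("framework", "Commercial Companies Law")]
  else if PySem.Str.isIn "abu dhabi" region then
    if PySem.Str.isIn "adgm" region then
      [("authority", "FSRA"), ("jurisdiction", "ADGM"), ("framework", "Common Law")]
    else
      [("authority", "CBUAE / AD-DED"), ("jurisdiction", "Mainland"), ("framework", "Federal Law")]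
  else if PySem.Str.isIn "egypt" region then
    if ["banking", "pay", "digital wallet"].any (fun x => PySem.Str.isIn x activity) then
      [("authority", "CBE"), ("jurisdiction", "National"), ("framework", "Law No. 194 of 2020")]
    else if ["micro-finance", "insurance", "capital"].any (fun x => PySem.Str.isIn x activity) then
      [("authority", "FRA"), ("jurisdiction", "National"), ("framework", "Law No. 10 of 2009")]
    else
      [("authority", "GAFI / ITIDA"), ("jurisdiction", "National"), ("framework", "Investment Law No. 72")]
  else
    [("authority", "UNKNOWN"), ("jurisdiction", region), ("framework", "REQUIRES_LEGAL_AUDIT")]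

-- ===== PORT B =====
-- the module-level data of Source B: zone list, per-zone activity taxonomy, flat result table
def rtrZones : List (String × Option String) :=
  [("dubai", some "difc"), ("abu dhabi", some "adgm"), ("egypt", none)]

def rtrActivityTags : List (String × List (String × List String)) :=
  [("dubai", [("crypto", ["crypto", "web3", "virtual asset"]),
              ("finance", ["banking", "payment", "insurance"])]),
   ("egypt", [("bank", ["banking", "pay", "digital wallet"]),
              ("fra", ["micro-finance", "insurance", "capital"])])]

def rtrTable : List ((String × Bool × String) × List (String × String)) :=
  [ (("dubai", true, "crypto"), [("authority", "DFSA"), ("jurisdiction", "DIFC"), ("framework", "DIFC Financial Law")]),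
    (("dubai", false, "crypto"), [("authority", "VARA"), ("jurisdiction", "Dubai (Non-DIFC)"), ("framework", "VARA Regulations")]),
    (("dubai", true, "finance"), [("authority", "DFSA"), ("jurisdiction", "DIFC"), ("framework", "DIFC Financial Law")]),
    (("dubai", false, "finance"), [("authority", "CBUAE"), ("jurisdiction", "Mainland/Onshore"), ("framework", "Federal Banking Law")]),
    (("dubai", true, "other"), [("authority", "DED"), ("jurisdiction", "Mainland"), ("framework", "Commercial Companies Law")]),
    (("dubai", false, "other"), [("authority", "DED"), ("jurisdiction", "Mainland"), ("framework", "Commercial Companies Law")]),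
    (("abu dhabi", true, "other"), [("authority", "FSRA"), ("jurisdiction", "ADGM"), ("framework", "Common Law")]),
    (("abu dhabi", false, "other"), [("authority", "CBUAE / AD-DED"), ("jurisdiction", "Mainland"), ("framework", "Federal Law")]),
    (("egypt", false, "bank"), [("authority", "CBE"), ("jurisdiction", "National"), ("framework", "Law No. 194 of 2020")]),
    (("egypt", false, "fra"), [("authority", "FRA"), ("jurisdiction", "National"), ("framework", "Law No. 10 of 2009")]),
    (("egypt", false, "other"), [("authority", "GAFI / ITIDA"), ("jurisdiction", "National"), ("framework", "Investment Law No. 72")]) ]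

def route_to_regulator_alt (business_model : List (String × String)) : List (String × String) :=
  let region := PySem.Str.lower (PySem.Dict.getD (PySem.Dict.mk business_model) "region" "Mainland Dubai")
  let activity := PySem.Str.lower (PySem.Dict.getD (PySem.Dict.mk business_model) "activity" "Generic")
  match rtrZones.find? (fun zm => PySem.Str.isIn zm.1 region) with
  | none =>
      [("authority", "UNKNOWN"), ("jurisdiction", region), ("framework", "REQUIRES_LEGAL_AUDIT")]
  | some (zone, marker) =>
      let flag := match marker with
                  | some m => PySem.Str.isIn m region
                  | none => false
      let cat := match (PySem.Dict.getD (PySem.Dict.mk rtrActivityTags) zone []).find?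
                       (fun ts => ts.2.any (fun s => PySem.Str.isIn s activity)) with
                 | some ts => ts.1
                 | none => "other"
      -- Python's TABLE[(zone, flag, cat)]; the key is always present, so the [] default is dead
      PySem.Dict.getD (PySem.Dict.mk rtrTable) (zone, flag, cat) []

-- ===== PRECONDITION & SPEC =====
def Spec_route_to_regulator (business_model : List (String × String)) (out : List (String × String)) : Prop := out = route_to_regulator_alt business_model
instance (business_model : List (String × String)) (out : List (String × String)) : Decidable (Spec_route_to_regulator business_model out) := by unfold Spec_route_to_regulator; infer_instance

-- ===== CLAIM (what is proved, stated in full; the proofs are below) =====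
def Claim_equal_route_to_regulator : Prop := ∀ (business_model : List (String × String)), Dom_route_to_regulator business_model → Spec_route_to_regulator business_model (route_to_regulator business_model)

-- ===== LEMMAS AND PROOFS =====
theorem rtr_eq (bm : List (String × String)) :
    route_to_regulator bm = route_to_regulator_alt bm := by
  unfold route_to_regulator route_to_regulator_alt
  generalize (PySem.Str.lower (PySem.Dict.getD (PySem.Dict.mk bm) "region" "Mainland Dubai")) = region
  generalize (PySem.Str.lower (PySem.Dict.getD (PySem.Dict.mk bm) "activity" "Generic")) = activity
  dsimp only
  split_ifs <;>
    cases hdifc : PySem.Chars.isIn ['d', 'i', 'f', 'c'] region.toList <;>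
    simp_all [rtrZones, rtrActivityTags, rtrTable, PySem.Dict.getD, PySem.Dict.get?,
              List.find?_cons] <;> decide

-- ===== VERDICT (by name: the statement is the Claim_ definition above) =====
theorem route_to_regulator_spec : Claim_equal_route_to_regulator := by
  intro bm _
  exact rtr_eq bm
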